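-- pv_equiv track=rewrite | github.com/thatguy-lcgm/codewars | kata/Beginner Series #2 Clock.py | past
-- ===== SOURCE A (Python) =====
-- def past(h, m, s):
--     ml = 0
--     while h > 0 or m > 0 or s > 0:
--         if h > 0:
--             ml += 3600000
--             h -= 1
--         if m > 0:
--             ml += 60000
--             m -= 1
--         if s > 0:
--             ml += 1000
--             s -= 1
--     return ml
-- ===== SOURCE B (Python) =====
-- def past(h, m, s):
--     # closed form: each unit contributes only while its counter is still positive
--     return 3600000 * max(h, 0) + 60000 * max(m, 0) + 1000 * max(s, 0)
-- ===== Notes on version B (the rewrite author's own statement) =====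
-- stated objective: faster
-- what changed: Replaced the countdown while-loop (one iteration per remaining hour/minute/second) with the closed-form formula 3600000*max(h,0)+60000*max(m,0)+1000*max(s,0).
import Mathlib
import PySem

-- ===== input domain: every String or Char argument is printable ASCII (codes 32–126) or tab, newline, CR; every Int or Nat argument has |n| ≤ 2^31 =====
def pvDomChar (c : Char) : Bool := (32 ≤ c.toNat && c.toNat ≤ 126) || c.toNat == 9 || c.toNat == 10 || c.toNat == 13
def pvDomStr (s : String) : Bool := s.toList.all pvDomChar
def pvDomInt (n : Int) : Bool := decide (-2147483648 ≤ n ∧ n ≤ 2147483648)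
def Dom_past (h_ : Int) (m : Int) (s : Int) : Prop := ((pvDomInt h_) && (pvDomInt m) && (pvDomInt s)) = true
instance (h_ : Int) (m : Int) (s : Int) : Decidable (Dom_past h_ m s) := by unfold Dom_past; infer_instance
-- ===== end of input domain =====

-- B replaces A's per-unit countdown loop with the closed form 3600000*max(h,0)+60000*max(m,0)+1000*max(s,0) (faster: O(1) vs O(max(h,m,s))).

-- ===== PORT A =====
-- the while-loop of A, state (h, m, s, ml), transliterated step for step
def pastLoop (h m s ml : Int) : Int :=
  if h > 0 ∨ m > 0 ∨ s > 0 then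
    let ml1 := if h > 0 then ml + 3600000 else ml
    let h1 := if h > 0 then h - 1 else h
    let ml2 := if m > 0 then ml1 + 60000 else ml1
    let m1 := if m > 0 then m - 1 else m
    let ml3 := if s > 0 then ml2 + 1000 else ml2
    let s1 := if s > 0 then s - 1 else s
    pastLoop h1 m1 s1 ml3
  else ml
termination_by h.toNat + m.toNat + s.toNat
decreasing_by
  split_ifs <;> simp_all <;> omega

def past (h_ : Int) (m : Int) (s : Int) : Int := pastLoop h_ m s 0

-- ===== PORT B =====
def past_alt (h_ : Int) (m : Int) (s : Int) : Int :=
  3600000 * max h_ 0 + 60000 * max m 0 + 1000 * max s 0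

-- ===== PRECONDITION & SPEC =====
def Spec_past (h_ : Int) (m : Int) (s : Int) (out : Int) : Prop := out = past_alt h_ m s
instance (h_ : Int) (m : Int) (s : Int) (out : Int) : Decidable (Spec_past h_ m s out) := by unfold Spec_past; infer_instance

-- ===== CLAIM (what is proved, stated in full; the proofs are below) =====
def Claim_equal_past : Prop := ∀ (h_ : Int) (m : Int) (s : Int), Dom_past h_ m s → Spec_past h_ m s (past h_ m s)

-- ===== LEMMAS AND PROOFS =====

theorem pastLoop_closed (h m s ml : Int) :
    pastLoop h m s ml = ml + 3600000 * max h 0 + 60000 * max m 0 + 1000 * max s 0 := by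
  fun_induction pastLoop h m s ml with
  | case1 h m s ml hcond ml1 h1 ml2 m1 ml3 s1 ih =>
    simp only [ml1, h1, ml2, m1, ml3, s1] at ih ⊢
    split_ifs at ih ⊢ <;> omega
  | case2 h m s ml hcond =>
    simp only [not_or, not_lt] at hcond
    omega

-- ===== VERDICT (by name: the statement is the Claim_ definition above) =====
theorem past_spec : Claim_equal_past := by
  intro h_ m s _
  unfold Spec_past past past_alt
  rw [pastLoop_closed]
  ring
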